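-- pv_equiv track=rewrite | github.com/rayen815/python | app/hbdo.py | isbin
-- ===== SOURCE A (Python) =====
-- def isbin(bin):
--     bin=str(bin)
--     t=True
--     if bin!="":
--         i=0
--         while t and i<len(bin):
--             if not(bin[i] in  ["0","1"]):
--                 t=False
--             i+=1
--     else:
--         t=False
--     return t
-- ===== SOURCE B (Python) =====
-- import re
--
-- def isbin(bin):
--     return re.fullmatch(r'[01]+', str(bin)) is not None
-- ===== Notes on version B (the rewrite author's own statement) =====
-- stated objective: idiomatic
-- what changed: Replaces the manual while-loop with a flag variable by a single regular-expression fullmatch against [01]+, whose + quantifier rejects the empty string just as A does.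
import Mathlib
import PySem

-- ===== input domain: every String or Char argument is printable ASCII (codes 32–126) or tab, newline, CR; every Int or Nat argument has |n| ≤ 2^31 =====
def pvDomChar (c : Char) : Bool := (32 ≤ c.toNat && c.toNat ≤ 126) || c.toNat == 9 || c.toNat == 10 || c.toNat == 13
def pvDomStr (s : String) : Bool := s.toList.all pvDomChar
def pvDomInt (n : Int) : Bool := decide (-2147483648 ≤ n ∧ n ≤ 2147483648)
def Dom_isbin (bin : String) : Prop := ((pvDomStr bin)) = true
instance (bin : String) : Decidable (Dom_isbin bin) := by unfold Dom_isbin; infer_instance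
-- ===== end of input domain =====

-- B replaces A's manual while-loop with a flag variable by a regular-expression
-- fullmatch against [01]+ (same behaviour, more idiomatic; no speed claim).


-- ===== PORT A =====
-- the while loop: 'while t and i<len(bin): if not(bin[i] in ["0","1"]): t=False; i+=1'
-- iterating over the remaining characters, carrying the flag t
def isbinLoopA (t : Bool) (cs : List Char) : Bool :=
  match cs with
  | [] => t
  | c :: rest =>
      if t then
        isbinLoopA (if ¬ (c = '0' ∨ c = '1') then false else t) rest
      else t

def isbin (bin : String) : Bool :=
  if bin ≠ "" then isbinLoopA true bin.toList else false

-- ===== PORT B =====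
-- re.fullmatch(r'[01]+', s) is not None: the regex [01]+ matches the whole
-- string iff it is nonempty and every character is '0' or '1' (exact semantics
-- of the library call Source B makes).
def isbin_alt (bin : String) : Bool :=
  bin.toList ≠ [] && bin.toList.all (fun c => c = '0' || c = '1')

-- ===== PRECONDITION & SPEC =====
def Spec_isbin (bin : String) (out : Bool) : Prop := out = isbin_alt bin
instance (bin : String) (out : Bool) : Decidable (Spec_isbin bin out) := by unfold Spec_isbin; infer_instance

-- ===== CLAIM (what is proved, stated in full; the proofs are below) =====
def Claim_equal_isbin : Prop := ∀ (bin : String), Dom_isbin bin → Spec_isbin bin (isbin bin)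

-- ===== LEMMAS AND PROOFS =====
theorem isbinLoopA_false (cs : List Char) : isbinLoopA false cs = false := by
  cases cs <;> simp [isbinLoopA]

theorem isbinLoopA_true (cs : List Char) :
    isbinLoopA true cs = cs.all (fun c => c = '0' || c = '1') := by
  induction cs with
  | nil => simp [isbinLoopA]
  | cons c rest ih =>
      by_cases h : c = '0' ∨ c = '1'
      · simp only [isbinLoopA, h, not_true_eq_false, if_false, ih, List.all_cons]
        rcases h with h | h <;> simp [h]
      · rw [not_or] at h
        simp [isbinLoopA, h, isbinLoopA_false]

theorem str_ne_empty_iff (s : String) : (s ≠ "") ↔ s.toList ≠ [] :=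
  (not_congr String.toList_eq_nil_iff).symm

-- ===== VERDICT (by name: the statement is the Claim_ definition above) =====
theorem isbin_spec : Claim_equal_isbin := by
  intro bin _
  unfold Spec_isbin isbin isbin_alt
  by_cases h : bin = ""
  · simp [h]
  · simp [h, (str_ne_empty_iff bin).mp h, isbinLoopA_true]
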